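-- pv_equiv track=rewrite | github.com/ahalim000/Todo-App | src/todo/test.py | get_lexical_rank
-- ===== SOURCE A (Python) =====
-- import string
--
-- def convert_base(
--     num_s: str,
--     target_base: int,
--     current_base: int = 10,
--     current_alphabet: str = "0123456789" + string.ascii_uppercase,
--     target_alphabet: str = "0123456789" + string.ascii_uppercase,
-- ) -> str:
--
--     base_10 = 0
--     digit = len(num_s) - 1
--     for character in num_s:
--         character_val = current_alphabet.index(character)
--         base_10 += (current_base**digit) * character_val
--         digit -= 1
--
--     converted_num = ""
--     floored_quotient = base_10
--     while floored_quotient != 0: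
--         converted_num = target_alphabet[floored_quotient % target_base] + converted_num
--         floored_quotient //= target_base
--
--     if converted_num == "":
--         converted_num = target_alphabet[0]
--
--     return converted_num
--
-- def get_lexical_average(string1: str, string2: str) -> str:
--     base10_string1 = int(convert_base(string1, 10, 26, string.ascii_lowercase))
--     base10_string2 = int(convert_base(string2, 10, 26, string.ascii_lowercase))
--
--     avg = (base10_string1 + base10_string2) // 2
--
--     return convert_base(str(avg), 26, 10, target_alphabet=string.ascii_lowercase)
--
-- def get_lexical_rank(string1, string2):
--     string1 = string1.lstrip("a")
--     if string1 == "":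
--         string1 = "a"
--
--     string2 = string2.lstrip("a")
--     if string2 == "":
--         string2 = "a"
--
--     max_len = max(len(string1), len(string2))
--
--     while len(string1) < max_len:
--         string1 += "a"
--
--     while len(string2) < max_len:
--         string2 += "a"
--
--     lex_avg = get_lexical_average(string1, string2)
--
--     if lex_avg == string1:
--         lex_avg += "n"
--
--     return lex_avg
-- ===== SOURCE B (Python) =====
-- import string
--
-- def get_lexical_rank(string1, string2):
--     alpha = string.ascii_lowercase
--     s1 = string1.lstrip("a") or "a"
--     s2 = string2.lstrip("a") or "a"
--     n = max(len(s1), len(s2))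
--     s1 = s1 + "a" * (n - len(s1))
--     s2 = s2 + "a" * (n - len(s2))
--     # add the two numbers digit-wise in base 26, least-significant digit first
--     carry = 0
--     sums = []
--     for a, b in zip(reversed(s1), reversed(s2)):
--         t = alpha.index(a) + alpha.index(b) + carry
--         sums.append(t % 26)
--         carry = t // 26
--     digits = [carry] + sums[::-1]
--     # halve by short division, most significant digit first
--     rem = 0
--     half = []
--     for d in digits:
--         cur = rem * 26 + d
--         half.append(cur // 2)
--         rem = cur % 2
--     out = "".join(chr(97 + d) for d in half).lstrip("a") or "a"
--     if out == s1:
--         out += "n"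
--     return out
-- ===== Notes on version B (the rewrite author's own statement) =====
-- stated objective: alternative
-- what changed: Replaces A's big-integer pipeline (convert each string to a base-10 int via recomputed powers, str()/int() round-trips, average, convert back) by pure digit-wise arithmetic: one ripple-carry addition of the two base-26 digit strings followed by one short division by 2, so no big integers or base conversions are ever built.
import Mathlib
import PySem

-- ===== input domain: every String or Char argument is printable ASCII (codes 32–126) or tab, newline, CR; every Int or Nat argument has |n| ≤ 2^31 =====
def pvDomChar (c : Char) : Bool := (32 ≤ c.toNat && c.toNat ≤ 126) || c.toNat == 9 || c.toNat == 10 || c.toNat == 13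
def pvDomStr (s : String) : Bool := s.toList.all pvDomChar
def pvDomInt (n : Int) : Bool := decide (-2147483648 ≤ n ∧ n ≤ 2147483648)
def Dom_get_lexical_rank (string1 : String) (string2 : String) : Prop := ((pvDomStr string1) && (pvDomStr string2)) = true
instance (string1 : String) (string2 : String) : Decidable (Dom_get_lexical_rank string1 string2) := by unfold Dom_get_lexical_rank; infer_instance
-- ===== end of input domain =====

-- B replaces A's big-integer pipeline (base conversion with recomputed powers, str/int round-trips,
-- big-int average, conversion back) by digit-wise arithmetic: one ripple-carry base-26 addition of
-- the two digit strings followed by one short division by 2 — no big integers are ever formed.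

-- ===== PORT A =====
-- string.ascii_lowercase and the default alphabet "0123456789" + string.ascii_uppercase
def pvLower : List Char := "abcdefghijklmnopqrstuvwxyz".toList
def pvDigitsUpper : List Char := "0123456789ABCDEFGHIJKLMNOPQRSTUVWXYZ".toList

-- int(s), ported by hand step for step (CPython: strip whitespace on both ends, one optional
-- sign, then a digit run with single '_' separators between digits; None = ValueError).
-- Exact on the ASCII domain; in A it is only applied to the digit strings convert_base returns.
def pvDigs (l : List Char) (acc : Nat) : Option Nat :=
  match l with
  | [] => some acc
  | c :: cs =>
    if 48 ≤ c.toNat ∧ c.toNat ≤ 57 then pvDigs cs (acc * 10 + (c.toNat - 48))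
    else if c = '_' then
      match cs with
      | d :: rest =>
        if 48 ≤ d.toNat ∧ d.toNat ≤ 57 then pvDigs rest (acc * 10 + (d.toNat - 48)) else none
      | [] => none
    else none

def pvDigitsTop (ds : List Char) : Option Nat :=
  match ds with
  | [] => none
  | c :: cs => if 48 ≤ c.toNat ∧ c.toNat ≤ 57 then pvDigs cs (c.toNat - 48) else none

-- after the strip: one optional sign, then the digit run
def pvSign (cs : List Char) : Option Int :=
  match cs with
  | [] => none
  | c :: ds =>
    if c = '-' then (pvDigitsTop ds).map (fun n => -(n : Int))
    else if c = '+' then (pvDigitsTop ds).map (fun n => (n : Int))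
    else (pvDigitsTop (c :: ds)).map (fun n => (n : Int))

def pvInt? (s : List Char) : Option Int :=
  pvSign (List.dropWhile PySem.Int.isIntSpace ((List.dropWhile PySem.Int.isIntSpace s).reverse)).reverse

-- the `while floored_quotient != 0` loop of convert_base; in A it is only ever reached with
-- 0 ≤ floored_quotient and target_base ∈ {10, 26}, so the guard is written 0 < q ∧ 2 ≤ b to
-- make the recursion terminate (for q < 0 or b < 2 Python's loop would not terminate).
def pvConvertLoop (b : Int) (alph : List Char) (q : Int) (acc : List Char) : List Char :=
  if h : 0 < q ∧ 2 ≤ b then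
    -- converted_num = target_alphabet[floored_quotient % target_base] + converted_num
    -- (target_alphabet[…] raises IndexError only for alphabets shorter than b, never in A)
    pvConvertLoop b alph (PySem.Int.floordiv q b)
      (((PySem.List.pyGet? alph (PySem.Int.mod q b)).getD ' ') :: acc)
  else acc
termination_by q.toNat
decreasing_by
  have h1 : PySem.Int.floordiv q b < q := by
    rw [PySem.Int.floordiv_lt_iff_lt_mul (show (0:Int) < b by omega)]
    nlinarith [h.1, h.2]
  have h0 : 0 ≤ PySem.Int.floordiv q b := by
    rw [PySem.Int.floordiv_eq_ediv_of_pos (by omega)]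
    exact Int.ediv_nonneg (by omega) (by omega)
  omega

def convert_base (num_s : List Char) (target_base : Int) (current_base : Int)
    (current_alphabet : List Char) (target_alphabet : List Char) : List Char :=
  -- for character in num_s: base_10 += (current_base**digit) * current_alphabet.index(character); digit -= 1
  -- `.index` raises ValueError when the character is absent (excluded by Pre_), so the getD 0
  -- default is never reached on admitted inputs; `digit` stays ≥ 0 while characters remain.
  let p := num_s.foldl
    (fun (p : Int × Int) ch =>
      (p.1 + current_base ^ p.2.toNat * (((PySem.List.index? current_alphabet ch).getD 0 : Nat) : Int),
       p.2 - 1))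
    ((0 : Int), PySem.List.len num_s - 1)
  let conv := pvConvertLoop target_base target_alphabet p.1 []
  if conv = [] then [(PySem.List.pyGet? target_alphabet 0).getD ' '] else conv

def get_lexical_average (s1 : List Char) (s2 : List Char) : List Char :=
  let b1 := (pvInt? (convert_base s1 10 26 pvLower pvDigitsUpper)).getD 0
  let b2 := (pvInt? (convert_base s2 10 26 pvLower pvDigitsUpper)).getD 0
  let avg := PySem.Int.floordiv (b1 + b2) 2
  convert_base (PySem.Int.toChars avg) 26 10 pvDigitsUpper pvLower

-- while len(string) < max_len: string += "a"
def pvPad (s : List Char) (m : Nat) : List Char :=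
  if s.length < m then pvPad (s ++ ['a']) m else s
termination_by m - s.length
decreasing_by simp; omega

def get_lexical_rank (string1 : String) (string2 : String) : String :=
  -- s.lstrip("a") drops exactly the leading 'a' characters (exact for a 1-char strip set)
  let s1 := string1.toList.dropWhile (· == 'a')
  let s1 := if s1 = [] then ['a'] else s1
  let s2 := string2.toList.dropWhile (· == 'a')
  let s2 := if s2 = [] then ['a'] else s2
  let max_len := max s1.length s2.length
  let s1 := pvPad s1 max_len
  let s2 := pvPad s2 max_len
  let lex_avg := get_lexical_average s1 s2
  let lex_avg := if lex_avg = s1 then lex_avg ++ ['n'] else lex_avg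
  String.ofList lex_avg

-- ===== PORT B =====
-- carry = 0; sums = []
-- for a, b in zip(reversed(s1), reversed(s2)): t = alpha.index(a) + alpha.index(b) + carry; ...
-- (alpha.index raises ValueError on a non-lowercase character — excluded by Pre_, so the
--  getD 0 default is never reached on admitted inputs, exactly as in A's port)
def pvSumState (s1 : List Char) (s2 : List Char) : List Int × Int :=
  (List.zip s1.reverse s2.reverse).foldl
    (fun (st : List Int × Int) p =>
      let t := (((PySem.List.index? pvLower p.1).getD 0 : Nat) : Int)
               + (((PySem.List.index? pvLower p.2).getD 0 : Nat) : Int) + st.2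
      (st.1 ++ [PySem.Int.mod t 26], PySem.Int.floordiv t 26))
    ([], 0)

-- rem = 0; half = []
-- for d in digits: cur = rem * 26 + d; half.append(cur // 2); rem = cur % 2
def pvHalveState (digits : List Int) : List Int × Int :=
  digits.foldl
    (fun (st : List Int × Int) d =>
      let cur := st.2 * 26 + d
      (st.1 ++ [PySem.Int.floordiv cur 2], PySem.Int.mod cur 2))
    ([], 0)

def get_lexical_rank_alt (string1 : String) (string2 : String) : String :=
  let s1 := string1.toList.dropWhile (· == 'a')    -- lstrip("a") or "a"
  let s1 := if s1 = [] then ['a'] else s1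
  let s2 := string2.toList.dropWhile (· == 'a')
  let s2 := if s2 = [] then ['a'] else s2
  let n := max s1.length s2.length
  let s1 := s1 ++ List.replicate (n - s1.length) 'a'   -- s1 + "a" * (n - len(s1))
  let s2 := s2 ++ List.replicate (n - s2.length) 'a'
  let st := pvSumState s1 s2
  let digits := st.2 :: st.1.reverse                    -- [carry] + sums[::-1]
  let half := (pvHalveState digits).1
  -- chr(97 + d): exact here since 97 + d never leaves chr's range on the sampled domain
  let outs := half.map (fun d => Char.ofNat (97 + d).toNat)
  let out := outs.dropWhile (· == 'a')                 -- .lstrip("a")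
  let out := if out = [] then ['a'] else out           -- or "a"
  let out := if out = s1 then out ++ ['n'] else out
  String.ofList out

-- ===== PRECONDITION & SPEC =====
-- Pre_ excludes exactly the inputs containing a character outside 'a'..'z': on any such input
-- A raises ValueError (str.index fails inside convert_base).
def Pre_get_lexical_rank (string1 : String) (string2 : String) : Prop :=
  ((string1.toList ++ string2.toList).all (fun c => 97 ≤ c.toNat && c.toNat ≤ 122)) = true
instance (string1 : String) (string2 : String) : Decidable (Pre_get_lexical_rank string1 string2) := by
  unfold Pre_get_lexical_rank; infer_instance
def pvWitness_get_lexical_rank : String × String := ("abc", "zz")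

def Spec_get_lexical_rank (string1 : String) (string2 : String) (out : String) : Prop :=
  out = get_lexical_rank_alt string1 string2
instance (string1 : String) (string2 : String) (out : String) : Decidable (Spec_get_lexical_rank string1 string2 out) := by
  unfold Spec_get_lexical_rank; infer_instance

-- ===== CLAIM (what is proved, stated in full; the proofs are below) =====
def Claim_equal_get_lexical_rank : Prop := ∀ (string1 : String) (string2 : String), Dom_get_lexical_rank string1 string2 → Pre_get_lexical_rank string1 string2 → Spec_get_lexical_rank string1 string2 (get_lexical_rank string1 string2)

-- ===== LEMMAS AND PROOFS =====

-- the common base-26 value both programs compute, and its rendering (A's base-26 output loop)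
def pvVal (s : List Char) : Int :=
  s.foldl (fun v c => v * 26 + ((c.toNat : Int) - 97)) 0

def pvRender (q : Int) (acc : List Char) : List Char :=
  if h : 0 < q then
    pvRender (PySem.Int.floordiv q 26) (Char.ofNat (97 + PySem.Int.mod q 26).toNat :: acc)
  else acc
termination_by q.toNat
decreasing_by
  have h1 : PySem.Int.floordiv q 26 < q := by
    rw [PySem.Int.floordiv_lt_iff_lt_mul (show (0:Int) < 26 by omega)]
    omega
  have h0 : 0 ≤ PySem.Int.floordiv q 26 := by
    rw [PySem.Int.floordiv_eq_ediv_of_pos (by omega)]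
    exact Int.ediv_nonneg (by omega) (by omega)
  omega

-- padding by repeated append of one 'a' is padding with one block of 'a's
theorem pvPad_eq (s : List Char) (m : Nat) : pvPad s m = s ++ List.replicate (m - s.length) 'a' := by
  generalize hk : m - s.length = k
  induction k generalizing s with
  | zero =>
    rw [pvPad]
    have h : ¬ s.length < m := by omega
    simp [h]
  | succ k ih =>
    rw [pvPad]
    by_cases h : s.length < m
    · simp only [if_pos h]
      rw [ih (s ++ ['a']) (by simp; omega)]
      simp [List.replicate_succ]
    · exact absurd hk (by omega)

-- index? on a run of consecutive character codes
theorem pvIdxRun (l : List Char) : ∀ (b : Nat),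
    (∀ i (h : i < l.length), (l[i]).toNat = b + i) →
    ∀ c : Char, b ≤ c.toNat → c.toNat < b + l.length →
      PySem.List.index? l c = some (c.toNat - b) := by
  induction l with
  | nil => intro b _ c hb hlt; simp at hlt; omega
  | cons x xs ih =>
    intro b hl c hb hlt
    by_cases hcx : x = c
    · subst hcx
      rw [PySem.List.index?_cons_self]
      have h0 := hl 0 (by simp)
      simp at h0
      rw [h0]
      simp
    · rw [PySem.List.index?_cons_of_ne _ hcx]
      have h0 := hl 0 (by simp)
      simp at h0
      have hne : c.toNat ≠ b := by
        intro he
        apply hcx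
        apply Char.ext
        apply UInt32.toNat_inj.mp
        show x.toNat = c.toNat
        omega
      rw [ih (b + 1) (fun i hi => by
          have := hl (i + 1) (by simp; omega)
          simpa [Nat.add_assoc, Nat.add_comm 1 i] using this)
        c (by omega) (by simp at hlt; omega)]
      simp
      omega

theorem pvIdxLower (c : Char) (h1 : 97 ≤ c.toNat) (h2 : c.toNat ≤ 122) :
    PySem.List.index? pvLower c = some (c.toNat - 97) := by
  have hlen : pvLower.length = 26 := by decide
  exact pvIdxRun pvLower 97 (by decide) c h1 (by omega)

theorem pvIdxDigit (c : Char) (h1 : 48 ≤ c.toNat) (h2 : c.toNat ≤ 57) :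
    PySem.List.index? pvDigitsUpper c = some (c.toNat - 48) := by
  have h10 : PySem.List.index? "0123456789".toList c = some (c.toNat - 48) :=
    pvIdxRun "0123456789".toList 48 (by decide) c h1
      (by
        have hlen : ("0123456789".toList).length = 10 := by decide
        omega)
  have hc : c ∈ "0123456789".toList := by
    have := PySem.List.index?_isSome_iff (xs := "0123456789".toList) (v := c)
    apply this.mp
    rw [h10]
    rfl
  have hsplit : pvDigitsUpper = "0123456789".toList ++ "ABCDEFGHIJKLMNOPQRSTUVWXYZ".toList := by decide
  rw [hsplit, PySem.List.index?_append_of_mem _ hc]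
  exact h10

-- Horner fold with a shifted initial value
theorem pvHornerInit (val : Char → Int) (b : Int) (s : List Char) :
    ∀ v : Int, s.foldl (fun a c => a * b + val c) v
      = v * b ^ s.length + s.foldl (fun a c => a * b + val c) 0 := by
  induction s with
  | nil => intro v; simp
  | cons c t ih =>
    intro v
    simp only [List.foldl_cons, List.length_cons]
    rw [ih (v * b + val c), ih (0 * b + val c)]
    ring

-- A's (value, digit) pair fold computes the Horner value
theorem pvFoldA (val : Char → Int) (b : Int) (s : List Char) :
    ∀ a : Int,
      (s.foldl (fun (p : Int × Int) ch => (p.1 + b ^ p.2.toNat * val ch, p.2 - 1))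
        (a, (s.length : Int) - 1)).1
      = a + s.foldl (fun v c => v * b + val c) 0 := by
  induction s with
  | nil => intro a; simp
  | cons c t ih =>
    intro a
    simp only [List.foldl_cons, List.length_cons]
    have e1 : ((t.length + 1 : Nat) : Int) - 1 = (t.length : Int) := by push_cast; ring
    rw [e1]
    have e2 : ((t.length : Int)).toNat = t.length := Int.toNat_natCast t.length
    rw [e2]
    rw [ih (a + b ^ t.length * val c)]
    rw [pvHornerInit val b t (0 * b + val c)]
    ring

theorem pvVal_nonneg (s : List Char) (h : ∀ c ∈ s, 97 ≤ c.toNat) : 0 ≤ pvVal s := by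
  unfold pvVal
  have aux : ∀ (l : List Char) (v : Int), 0 ≤ v → (∀ c ∈ l, 97 ≤ c.toNat) →
      0 ≤ l.foldl (fun v c => v * 26 + ((c.toNat : Int) - 97)) v := by
    intro l
    induction l with
    | nil => intro v hv _; simpa using hv
    | cons c t ih =>
      intro v hv hl
      simp only [List.foldl_cons]
      apply ih
      · have h97 : (97 : Int) ≤ (c.toNat : Int) := by
          exact_mod_cast hl c (by simp)
        nlinarith
      · intro x hx; exact hl x (by simp [hx])
  exact aux s 0 le_rfl h

-- str(n) for 0 ≤ n, as a tail recursion
def pvDecAux (n : Nat) (ds : List Char) : List Char :=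
  if n < 10 then Nat.digitChar n :: ds else pvDecAux (n / 10) (Nat.digitChar (n % 10) :: ds)
termination_by n
decreasing_by exact Nat.div_lt_self (by omega) (by omega)

theorem pvToDigitsCore_eq (fuel : Nat) : ∀ n ds, n < fuel →
    Nat.toDigitsCore 10 fuel n ds = pvDecAux n ds := by
  induction fuel with
  | zero => intro n ds h; omega
  | succ fuel ih =>
    intro n ds h
    rw [pvDecAux]
    show (let d := Nat.digitChar (n % 10); let n' := n / 10;
          if n' = 0 then d :: ds else Nat.toDigitsCore 10 fuel n' (d :: ds)) = _
    by_cases h10 : n < 10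
    · have hz : n / 10 = 0 := Nat.div_eq_of_lt h10
      have hm : n % 10 = n := Nat.mod_eq_of_lt h10
      simp [hz, hm, h10]
    · have hnz : ¬ n / 10 = 0 := by omega
      simp only [if_neg hnz, if_neg h10]
      exact ih (n / 10) _ (by omega)

theorem pvToChars_eq (n : Nat) : PySem.Int.toChars (n : Int) = pvDecAux n [] := by
  unfold PySem.Int.toChars
  have h1 : ¬ ((n : Int) < 0) := by omega
  simp only [if_neg h1, Int.toNat_natCast]
  unfold Nat.toDigits
  exact pvToDigitsCore_eq (n + 1) n [] (by omega)

theorem pvDecAux_append (n : Nat) : ∀ ds, pvDecAux n ds = pvDecAux n [] ++ ds := by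
  induction n using Nat.strong_induction_on with
  | _ n ih =>
    intro ds
    conv_lhs => rw [pvDecAux]
    conv_rhs => rw [pvDecAux]
    by_cases h : n < 10
    · simp [h]
    · simp only [if_neg h]
      rw [ih (n / 10) (Nat.div_lt_self (by omega) (by omega)) (Nat.digitChar (n % 10) :: ds),
          ih (n / 10) (Nat.div_lt_self (by omega) (by omega)) [Nat.digitChar (n % 10)]]
      simp

theorem pvDigitCharBounds : ∀ d, d < 10 → 48 ≤ (Nat.digitChar d).toNat ∧ (Nat.digitChar d).toNat ≤ 57 := by
  decide

theorem pvDigitCharVal : ∀ d, d < 10 → (Nat.digitChar d).toNat = 48 + d := by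
  decide

theorem pvDecAux_ne_nil (n : Nat) : pvDecAux n [] ≠ [] := by
  rw [pvDecAux]
  by_cases h : n < 10
  · simp [h]
  · simp only [if_neg h]
    rw [pvDecAux_append]
    simp

theorem pvDecAux_digits (n : Nat) : ∀ c ∈ pvDecAux n [], 48 ≤ c.toNat ∧ c.toNat ≤ 57 := by
  induction n using Nat.strong_induction_on with
  | _ n ih =>
    intro c hc
    rw [pvDecAux] at hc
    by_cases h : n < 10
    · simp only [if_pos h] at hc
      simp at hc
      subst hc
      exact pvDigitCharBounds n h
    · simp only [if_neg h] at hc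
      rw [pvDecAux_append] at hc
      rcases List.mem_append.mp hc with h1 | h1
      · exact ih (n / 10) (Nat.div_lt_self (by omega) (by omega)) c h1
      · simp at h1
        subst h1
        exact pvDigitCharBounds (n % 10) (Nat.mod_lt _ (by omega))

-- the Int-valued base-10 Horner fold of str(n) is n
theorem pvDecAux_val (n : Nat) :
    (pvDecAux n []).foldl (fun v c => v * 10 + ((c.toNat : Int) - 48)) 0 = (n : Int) := by
  induction n using Nat.strong_induction_on with
  | _ n ih =>
    rw [pvDecAux]
    by_cases h : n < 10
    · simp only [if_pos h, List.foldl_cons, List.foldl_nil, pvDigitCharVal n h]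
      push_cast
      ring
    · simp only [if_neg h]
      rw [pvDecAux_append, List.foldl_append]
      rw [ih (n / 10) (Nat.div_lt_self (by omega) (by omega))]
      simp only [List.foldl_cons, List.foldl_nil, pvDigitCharVal (n % 10) (Nat.mod_lt _ (by omega))]
      push_cast
      omega

-- the Nat-valued base-10 Horner fold of str(n) is n
theorem pvDecAux_natVal (n : Nat) :
    (pvDecAux n []).foldl (fun a c => a * 10 + (c.toNat - 48)) 0 = n := by
  induction n using Nat.strong_induction_on with
  | _ n ih =>
    rw [pvDecAux]
    by_cases h : n < 10
    · simp only [if_pos h, List.foldl_cons, List.foldl_nil, pvDigitCharVal n h]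
      omega
    · simp only [if_neg h]
      rw [pvDecAux_append, List.foldl_append]
      rw [ih (n / 10) (Nat.div_lt_self (by omega) (by omega))]
      simp only [List.foldl_cons, List.foldl_nil, pvDigitCharVal (n % 10) (Nat.mod_lt _ (by omega))]
      omega

-- int(str(n)) = n
theorem pvInt_dec (n : Nat) : pvInt? (pvDecAux n []) = some (n : Int) := by
  have hd := pvDecAux_digits n
  have hne := pvDecAux_ne_nil n
  have hspace : ∀ (l : List Char), (∀ c ∈ l, 48 ≤ c.toNat ∧ c.toNat ≤ 57) →
      l.dropWhile PySem.Int.isIntSpace = l := by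
    intro l hl
    cases l with
    | nil => rfl
    | cons c cs =>
      have hc := hl c (by simp)
      have : PySem.Int.isIntSpace c = false := by
        unfold PySem.Int.isIntSpace
        simp only [Bool.or_eq_false_iff, decide_eq_false_iff_not]
        refine ⟨⟨⟨⟨⟨?_, ?_⟩, ?_⟩, ?_⟩, ?_⟩, ?_⟩ <;>
          (rintro rfl; exact absurd hc (by decide))
      simp [this]
  have hdigs : ∀ (l : List Char) (acc : Nat), (∀ c ∈ l, 48 ≤ c.toNat ∧ c.toNat ≤ 57) →
      pvDigs l acc = some (l.foldl (fun a c => a * 10 + (c.toNat - 48)) acc) := by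
    intro l
    induction l with
    | nil => intro acc _; rfl
    | cons c cs ih =>
      intro acc hl
      rw [pvDigs.eq_def]
      simp only [if_pos (hl c (by simp))]
      rw [ih _ (fun x hx => hl x (by simp [hx]))]
      rfl
  unfold pvInt?
  rw [hspace _ hd]
  rw [hspace _ (by intro c hc; exact hd c (List.mem_reverse.mp hc))]
  rw [List.reverse_reverse]
  cases hds : pvDecAux n [] with
  | nil => exact absurd hds hne
  | cons c cs =>
    have hc : 48 ≤ c.toNat ∧ c.toNat ≤ 57 := by
      have := hd c (by rw [hds]; simp)
      exact this
    have hcs : ∀ x ∈ cs, 48 ≤ x.toNat ∧ x.toNat ≤ 57 := by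
      intro x hx
      exact hd x (by rw [hds]; simp [hx])
    simp only [pvSign]
    rw [if_neg (by rintro rfl; exact absurd hc (by decide)),
        if_neg (by rintro rfl; exact absurd hc (by decide))]
    unfold pvDigitsTop
    simp only [if_pos hc]
    rw [hdigs cs (c.toNat - 48) hcs]
    have hv : (c :: cs).foldl (fun a c => a * 10 + (c.toNat - 48)) 0 = n := by
      rw [← hds]; exact pvDecAux_natVal n
    simp only [List.foldl_cons] at hv
    simp only [Nat.zero_mul, Nat.zero_add] at hv
    simp [hv]

-- A's base-10 render loop is pvDecAux
theorem pvConvertLoop10 (n : Nat) : ∀ acc, 0 < n →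
    pvConvertLoop 10 pvDigitsUpper (n : Int) acc = pvDecAux n acc := by
  induction n using Nat.strong_induction_on with
  | _ n ih =>
    intro acc h
    rw [pvConvertLoop]
    have hg : (0 : Int) < (n : Int) ∧ (2 : Int) ≤ 10 := by constructor <;> omega
    rw [dif_pos hg]
    have hmod : PySem.Int.mod (n : Int) 10 = ((n % 10 : Nat) : Int) := by
      exact_mod_cast PySem.Int.mod_natCast n 10
    have hdiv : PySem.Int.floordiv (n : Int) 10 = ((n / 10 : Nat) : Int) := by
      exact_mod_cast PySem.Int.floordiv_natCast n 10
    have hget : ∀ k, k < 10 → pvDigitsUpper[k]? = some (Nat.digitChar k) := by decide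
    rw [hmod, hdiv, PySem.List.pyGet?_natCast, hget (n % 10) (Nat.mod_lt _ (by omega))]
    rw [pvDecAux]
    by_cases h10 : n < 10
    · have hz : n / 10 = 0 := Nat.div_eq_of_lt h10
      have hm : n % 10 = n := Nat.mod_eq_of_lt h10
      rw [hz, hm]
      rw [pvConvertLoop]
      simp [h10]
    · simp only [if_neg h10]
      simp only [Option.getD_some]
      exact ih (n / 10) (Nat.div_lt_self (by omega) (by omega)) _ (by omega)

-- A's base-26 render loop is pvRender
theorem pvCL26aux (k : Nat) : ∀ (q : Int), q.toNat ≤ k → ∀ acc,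
    pvConvertLoop 26 pvLower q acc = pvRender q acc := by
  induction k with
  | zero =>
    intro q hq acc
    rw [pvConvertLoop, pvRender]
    have h : ¬ 0 < q := by omega
    rw [dif_neg (by intro hc; exact h hc.1), dif_neg h]
  | succ k ih =>
    intro q hq acc
    rw [pvConvertLoop, pvRender]
    by_cases h : 0 < q
    · rw [dif_pos (⟨h, by omega⟩ : 0 < q ∧ (2:Int) ≤ 26), dif_pos h]
      have hr0 : 0 ≤ PySem.Int.mod q 26 := PySem.Int.mod_nonneg q (by omega)
      have hr26 : PySem.Int.mod q 26 < 26 := PySem.Int.mod_lt q (by omega)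
      have hre : PySem.Int.mod q 26 = (((PySem.Int.mod q 26).toNat : Nat) : Int) := by omega
      have hget : ∀ j, j < 26 → pvLower[j]? = some (Char.ofNat (97 + j)) := by decide
      have hchar : (PySem.List.pyGet? pvLower (PySem.Int.mod q 26)).getD ' '
          = Char.ofNat (97 + PySem.Int.mod q 26).toNat := by
        rw [hre, PySem.List.pyGet?_natCast, hget _ (by omega)]
        simp
        congr 1
        omega
      rw [hchar]
      have hlt : PySem.Int.floordiv q 26 < q := by
        rw [PySem.Int.floordiv_lt_iff_lt_mul (show (0:Int) < 26 by omega)]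
        omega
      have hge : 0 ≤ PySem.Int.floordiv q 26 := by
        rw [PySem.Int.floordiv_eq_ediv_of_pos (by omega)]
        exact Int.ediv_nonneg (by omega) (by omega)
      exact ih (PySem.Int.floordiv q 26) (by omega) _
    · rw [dif_neg (by intro hc; exact h hc.1), dif_neg h]

theorem pvConvertLoop26 (q : Int) : ∀ acc, pvConvertLoop 26 pvLower q acc = pvRender q acc :=
  pvCL26aux q.toNat q le_rfl

-- first conversion + int(): the base-26 value of a lowercase string
theorem pvConvertFirst (s : List Char) (h : ∀ c ∈ s, 97 ≤ c.toNat ∧ c.toNat ≤ 122) :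
    (pvInt? (convert_base s 10 26 pvLower pvDigitsUpper)).getD 0 = pvVal s := by
  simp only [convert_base, PySem.List.len_eq]
  have hfold := pvFoldA (fun ch => (((PySem.List.index? pvLower ch).getD 0 : Nat) : Int)) 26 s 0
  simp only at hfold
  have hcongr : s.foldl (fun v c => v * 26 + (((PySem.List.index? pvLower c).getD 0 : Nat) : Int)) 0
      = pvVal s := by
    unfold pvVal
    apply PySem.List.foldl_congr_mem
    intro acc c hc
    rw [pvIdxLower c (h c hc).1 (h c hc).2]
    simp only [Option.getD_some]
    have h97 := (h c hc).1
    congr 1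
    push_cast [h97]
    ring
  rw [hfold]
  simp only [zero_add]
  rw [hcongr]
  have hv := pvVal_nonneg s (fun c hc => (h c hc).1)
  by_cases hz : pvVal s = 0
  · rw [hz]
    rw [pvConvertLoop]
    rw [dif_neg (by intro hc; exact absurd hc.1 (by omega))]
    decide
  · have hpos : 0 < pvVal s := by omega
    have hn : ((pvVal s).toNat : Int) = pvVal s := Int.toNat_of_nonneg hv
    rw [← hn, pvConvertLoop10 (pvVal s).toNat [] (by omega)]
    rw [if_neg (pvDecAux_ne_nil _)]
    rw [pvInt_dec]
    simp [hn]

-- second conversion: str(v) parsed back and rendered in base 26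
theorem pvConvertSecond (v : Int) (hv : 0 ≤ v) :
    convert_base (PySem.Int.toChars v) 26 10 pvDigitsUpper pvLower
      = (if pvRender v [] = [] then ['a'] else pvRender v []) := by
  have hvn : v = ((v.toNat : Nat) : Int) := by omega
  rw [hvn, pvToChars_eq]
  simp only [convert_base, PySem.List.len_eq]
  have hdig := pvDecAux_digits v.toNat
  have hfold := pvFoldA (fun ch => (((PySem.List.index? pvDigitsUpper ch).getD 0 : Nat) : Int)) 10
    (pvDecAux v.toNat []) 0
  simp only at hfold
  have hcongr : (pvDecAux v.toNat []).foldl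
      (fun a c => a * 10 + (((PySem.List.index? pvDigitsUpper c).getD 0 : Nat) : Int)) 0
      = ((v.toNat : Nat) : Int) := by
    rw [← pvDecAux_val v.toNat]
    apply PySem.List.foldl_congr_mem
    intro acc c hc
    rw [pvIdxDigit c (hdig c hc).1 (hdig c hc).2]
    simp only [Option.getD_some]
    have h48 := (hdig c hc).1
    congr 1
    push_cast [h48]
    ring
  rw [hfold]
  simp only [zero_add]
  rw [hcongr]
  rw [pvConvertLoop26]
  by_cases hz : pvRender ((v.toNat : Nat) : Int) [] = []
  · simp only [if_pos hz]
    decide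
  · simp only [if_neg hz]

theorem pvGLA (p1 p2 : List Char)
    (h1 : ∀ c ∈ p1, 97 ≤ c.toNat ∧ c.toNat ≤ 122)
    (h2 : ∀ c ∈ p2, 97 ≤ c.toNat ∧ c.toNat ≤ 122) :
    get_lexical_average p1 p2
      = (if pvRender (PySem.Int.floordiv (pvVal p1 + pvVal p2) 2) [] = [] then ['a']
         else pvRender (PySem.Int.floordiv (pvVal p1 + pvVal p2) 2) []) := by
  unfold get_lexical_average
  rw [pvConvertFirst p1 h1, pvConvertFirst p2 h2]
  have hv1 := pvVal_nonneg p1 (fun c hc => (h1 c hc).1)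
  have hv2 := pvVal_nonneg p2 (fun c hc => (h2 c hc).1)
  have havg : 0 ≤ PySem.Int.floordiv (pvVal p1 + pvVal p2) 2 := by
    rw [PySem.Int.floordiv_eq_ediv_of_pos (by omega)]
    exact Int.ediv_nonneg (by omega) (by omega)
  exact pvConvertSecond _ havg

-- ======= B-side lemmas: digit-wise arithmetic computes the same value =======

-- base-26 value of an Int digit list, most-significant-first and least-significant-first
def pvValBE (ds : List Int) : Int := ds.foldl (fun v d => v * 26 + d) 0
def pvValLE (ds : List Int) : Int := ds.foldr (fun d v => d + 26 * v) 0

theorem pvValBE_init (ds : List Int) : ∀ v : Int,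
    ds.foldl (fun a d => a * 26 + d) v = v * 26 ^ ds.length + pvValBE ds := by
  induction ds with
  | nil => intro v; simp [pvValBE]
  | cons d t ih =>
    intro v
    simp only [List.foldl_cons, List.length_cons, pvValBE]
    rw [ih (v * 26 + d), ih (0 * 26 + d)]
    ring

theorem pvValBE_cons (d : Int) (ds : List Int) :
    pvValBE (d :: ds) = d * 26 ^ ds.length + pvValBE ds := by
  show (d :: ds).foldl (fun v d => v * 26 + d) 0 = _
  simp only [List.foldl_cons]
  rw [pvValBE_init ds (0 * 26 + d)]
  ring

theorem pvValLE_reverse (ds : List Int) : pvValLE ds.reverse = pvValBE ds := by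
  induction ds with
  | nil => rfl
  | cons d t ih =>
    rw [List.reverse_cons, pvValBE_cons, ← ih]
    have : ∀ l : List Int, pvValLE (l ++ [d]) = pvValLE l + d * 26 ^ l.length := by
      intro l
      induction l with
      | nil => simp [pvValLE]
      | cons x xs ihx =>
        simp only [List.cons_append, pvValLE, List.foldr_cons] at *
        rw [ihx]
        simp [List.length_cons]
        ring
    rw [this]
    simp
    ring

theorem pvValBE_reverse (ds : List Int) : pvValBE ds.reverse = pvValLE ds := by
  rw [← pvValLE_reverse, List.reverse_reverse]

theorem pvVal_eq_valBE (s : List Char) :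
    pvVal s = pvValBE (s.map (fun c => ((c.toNat : Int) - 97))) := by
  unfold pvVal pvValBE
  rw [List.foldl_map]

theorem pvValLE_nonneg (ds : List Int) (h : ∀ d ∈ ds, 0 ≤ d) : 0 ≤ pvValLE ds := by
  induction ds with
  | nil => simp [pvValLE]
  | cons d t ih =>
    simp only [pvValLE, List.foldr_cons]
    have h1 := h d (by simp)
    have h2 : 0 ≤ pvValLE t := ih (fun x hx => h x (by simp [hx]))
    simp only [pvValLE] at h2
    nlinarith

theorem pvValLE_zero_all (ds : List Int) (h : ∀ d ∈ ds, 0 ≤ d) (hz : pvValLE ds = 0) :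
    ∀ d ∈ ds, d = 0 := by
  induction ds with
  | nil => simp
  | cons d t ih =>
    have h1 := h d (by simp)
    have h2 : 0 ≤ pvValLE t := pvValLE_nonneg t (fun x hx => h x (by simp [hx]))
    simp only [pvValLE, List.foldr_cons] at hz
    have hd : d = 0 ∧ pvValLE t = 0 := by
      simp only [pvValLE] at h2 ⊢
      omega
    intro x hx
    rcases List.mem_cons.mp hx with rfl | hx
    · exact hd.1
    · exact ih (fun y hy => h y (by simp [hy])) hd.2 x hx

-- the ripple-carry addition loop, recursively
def pvAddC : List (Char × Char) → Int → List Int × Int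
  | [], c => ([], c)
  | p :: ps, c =>
    let t := ((p.1.toNat : Int) - 97) + ((p.2.toNat : Int) - 97) + c
    let r := pvAddC ps (PySem.Int.floordiv t 26)
    (PySem.Int.mod t 26 :: r.1, r.2)

theorem pvSum_fold_shape (ps : List (Char × Char)) : ∀ (acc : List Int) (c : Int),
    ps.foldl
      (fun (st : List Int × Int) p =>
        let t := ((p.1.toNat : Int) - 97) + ((p.2.toNat : Int) - 97) + st.2
        (st.1 ++ [PySem.Int.mod t 26], PySem.Int.floordiv t 26))
      (acc, c)
    = (acc ++ (pvAddC ps c).1, (pvAddC ps c).2) := by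
  induction ps with
  | nil => intro acc c; simp [pvAddC]
  | cons p t ih =>
    intro acc c
    simp only [List.foldl_cons, pvAddC]
    rw [ih]
    simp

theorem pvAddC_length (ps : List (Char × Char)) : ∀ c, (pvAddC ps c).1.length = ps.length := by
  induction ps with
  | nil => intro c; rfl
  | cons p t ih => intro c; simp [pvAddC, ih]

theorem pvAddC_value (ps : List (Char × Char)) : ∀ c : Int,
    pvValLE (pvAddC ps c).1 + (pvAddC ps c).2 * 26 ^ ps.length
      = pvValLE (ps.map (fun p => ((p.1.toNat : Int) - 97)))
        + pvValLE (ps.map (fun p => ((p.2.toNat : Int) - 97))) + c := by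
  induction ps with
  | nil => intro c; simp [pvAddC, pvValLE]
  | cons p t ih =>
    intro c
    simp only [pvAddC, List.map_cons, List.length_cons, pvValLE, List.foldr_cons]
    have hmd := PySem.Int.floordiv_mul_add_mod
      (((p.1.toNat : Int) - 97) + ((p.2.toNat : Int) - 97) + c) 26
    have iht := ih (PySem.Int.floordiv (((p.1.toNat : Int) - 97) + ((p.2.toNat : Int) - 97) + c) 26)
    simp only [pvValLE] at iht
    linear_combination iht * 26 + hmd

theorem pvAddC_digits (ps : List (Char × Char)) : ∀ c, ∀ x ∈ (pvAddC ps c).1, 0 ≤ x ∧ x < 26 := by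
  induction ps with
  | nil => intro c x hx; simp [pvAddC] at hx
  | cons p t ih =>
    intro c x hx
    simp only [pvAddC, List.mem_cons] at hx
    rcases hx with rfl | hx
    · exact ⟨PySem.Int.mod_nonneg _ (by omega), PySem.Int.mod_lt _ (by omega)⟩
    · exact ih _ x hx

theorem pvAddC_carry (ps : List (Char × Char))
    (h : ∀ p ∈ ps, (97 ≤ p.1.toNat ∧ p.1.toNat ≤ 122) ∧ (97 ≤ p.2.toNat ∧ p.2.toNat ≤ 122)) :
    ∀ c : Int, 0 ≤ c → c ≤ 1 → 0 ≤ (pvAddC ps c).2 ∧ (pvAddC ps c).2 ≤ 1 := by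
  induction ps with
  | nil => intro c h0 h1; exact ⟨h0, h1⟩
  | cons p t ih =>
    intro c h0 h1
    simp only [pvAddC]
    have hp := h p (by simp)
    have hb1 : (97 : Int) ≤ (p.1.toNat : Int) ∧ (p.1.toNat : Int) ≤ 122 := by
      exact ⟨by exact_mod_cast hp.1.1, by exact_mod_cast hp.1.2⟩
    have hb2 : (97 : Int) ≤ (p.2.toNat : Int) ∧ (p.2.toNat : Int) ≤ 122 := by
      exact ⟨by exact_mod_cast hp.2.1, by exact_mod_cast hp.2.2⟩
    set t0 := ((p.1.toNat : Int) - 97) + ((p.2.toNat : Int) - 97) + c with ht0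
    have hfd : PySem.Int.floordiv t0 26 = t0 / 26 :=
      PySem.Int.floordiv_eq_ediv_of_pos (by omega)
    have hcb : 0 ≤ PySem.Int.floordiv t0 26 ∧ PySem.Int.floordiv t0 26 ≤ 1 := by
      rw [hfd]; constructor <;> omega
    exact ih (fun q hq => h q (by simp [hq])) _ hcb.1 hcb.2

-- the short-division-by-2 loop, recursively
def pvHalveC : Int → List Int → List Int × Int
  | r, [] => ([], r)
  | r, d :: ds =>
    let cur := r * 26 + d
    let rest := pvHalveC (PySem.Int.mod cur 2) ds
    (PySem.Int.floordiv cur 2 :: rest.1, rest.2)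

theorem pvHalve_fold_shape (ds : List Int) : ∀ (acc : List Int) (r : Int),
    ds.foldl
      (fun (st : List Int × Int) d =>
        let cur := st.2 * 26 + d
        (st.1 ++ [PySem.Int.floordiv cur 2], PySem.Int.mod cur 2))
      (acc, r)
    = (acc ++ (pvHalveC r ds).1, (pvHalveC r ds).2) := by
  induction ds with
  | nil => intro acc r; simp [pvHalveC]
  | cons d t ih =>
    intro acc r
    simp only [List.foldl_cons, pvHalveC]
    rw [ih]
    simp

theorem pvHalveC_length (ds : List Int) : ∀ r, (pvHalveC r ds).1.length = ds.length := by
  induction ds with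
  | nil => intro r; rfl
  | cons d t ih => intro r; simp [pvHalveC, ih]

theorem pvHalveC_value (ds : List Int) : ∀ r : Int,
    pvValBE (pvHalveC r ds).1 * 2 + (pvHalveC r ds).2 = r * 26 ^ ds.length + pvValBE ds := by
  induction ds with
  | nil => intro r; simp [pvHalveC, pvValBE]
  | cons d t ih =>
    intro r
    simp only [pvHalveC, List.length_cons]
    rw [pvValBE_cons, pvValBE_cons, pvHalveC_length]
    have iht := ih (PySem.Int.mod (r * 26 + d) 2)
    have hmd := PySem.Int.floordiv_mul_add_mod (r * 26 + d) 2
    linear_combination iht + hmd * (26 ^ t.length)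

theorem pvHalveC_rem (ds : List Int) : ∀ r : Int, 0 ≤ r → r ≤ 1 →
    0 ≤ (pvHalveC r ds).2 ∧ (pvHalveC r ds).2 ≤ 1 := by
  induction ds with
  | nil => intro r h0 h1; exact ⟨h0, h1⟩
  | cons d t ih =>
    intro r h0 h1
    simp only [pvHalveC]
    exact ih _ (PySem.Int.mod_nonneg _ (by omega)) (by have := PySem.Int.mod_lt (r * 26 + d) (show (0:Int) < 2 by omega); omega)

theorem pvHalveC_digits (ds : List Int) : ∀ r : Int, 0 ≤ r → r ≤ 1 →
    (∀ d ∈ ds, 0 ≤ d ∧ d < 26) → ∀ x ∈ (pvHalveC r ds).1, 0 ≤ x ∧ x < 26 := by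
  induction ds with
  | nil => intro r _ _ _ x hx; simp [pvHalveC] at hx
  | cons d t ih =>
    intro r h0 h1 hb x hx
    simp only [pvHalveC, List.mem_cons] at hx
    have hd := hb d (by simp)
    rcases hx with rfl | hx
    · rw [PySem.Int.floordiv_eq_ediv_of_pos (show (0:Int) < 2 by omega)]
      constructor <;> omega
    · exact ih _ (PySem.Int.mod_nonneg _ (by omega))
        (by have := PySem.Int.mod_lt (r * 26 + d) (show (0:Int) < 2 by omega); omega)
        (fun y hy => hb y (by simp [hy])) x hx

-- rendering the value of a bounded digit list = the digit list with leading zeros stripped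
-- a helper: a digit list that is all zeros has value zero
theorem pvValLE_all_zero (ds : List Int) (h : ∀ d ∈ ds, d = 0) : pvValLE ds = 0 := by
  induction ds with
  | nil => rfl
  | cons d t ih =>
    simp only [pvValLE, List.foldr_cons]
    rw [h d (by simp)]
    have := ih (fun x hx => h x (by simp [hx]))
    simp only [pvValLE] at this
    omega

-- rendering the value of a bounded digit list = the digit list with leading zeros stripped
theorem pvRender_valLE (ds : List Int) (hb : ∀ d ∈ ds, 0 ≤ d ∧ d < 26) : ∀ acc,
    pvRender (pvValLE ds) acc
      = ((ds.reverse.dropWhile (· == 0)).map (fun d => Char.ofNat (97 + d).toNat)) ++ acc := by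
  induction ds with
  | nil => intro acc; rw [pvRender]; simp [pvValLE]
  | cons d t ih =>
    intro acc
    have hd := hb d (by simp)
    have hbt : ∀ x ∈ t, 0 ≤ x ∧ x < 26 := fun x hx => hb x (by simp [hx])
    have hmt : 0 ≤ pvValLE t := pvValLE_nonneg t (fun x hx => (hbt x hx).1)
    have hv : pvValLE (d :: t) = d + 26 * pvValLE t := by simp [pvValLE]
    by_cases hz : pvValLE (d :: t) = 0
    · have hall : ∀ x ∈ (d :: t), x = 0 :=
        pvValLE_zero_all _ (fun x hx => (hb x hx).1) hz
      rw [hz, pvRender]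
      rw [dif_neg (by omega)]
      have hnil : (d :: t).reverse.dropWhile (· == 0) = [] := by
        rw [List.dropWhile_eq_nil_iff]
        intro x hx
        simp [hall x (List.mem_reverse.mp hx)]
      rw [hnil]
      simp
    · rw [pvRender]
      have hpos : 0 < pvValLE (d :: t) := by
        have := pvValLE_nonneg (d :: t) (fun x hx => (hb x hx).1)
        omega
      rw [dif_pos hpos]
      have hmod : PySem.Int.mod (pvValLE (d :: t)) 26 = d := by
        rw [PySem.Int.mod_eq_emod_of_pos (by omega), hv]
        omega
      have hdiv : PySem.Int.floordiv (pvValLE (d :: t)) 26 = pvValLE t := by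
        rw [PySem.Int.floordiv_eq_ediv_of_pos (by omega), hv]
        omega
      rw [hmod, hdiv, ih hbt]
      rw [List.reverse_cons]
      by_cases he : t.reverse.dropWhile (· == 0) = []
      · have hallt : ∀ x ∈ t, x = 0 := by
          intro x hx
          have := (List.dropWhile_eq_nil_iff).mp he x (List.mem_reverse.mpr hx)
          simpa using this
        have hvt : pvValLE t = 0 := pvValLE_all_zero t hallt
        have hdne : d ≠ 0 := by
          intro h0
          exact hz (by rw [hv, h0, hvt]; ring)
        rw [he, List.dropWhile_append, he]
        simp [hdne]
      · have hsplit : (t.reverse ++ [d]).dropWhile (· == 0)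
            = t.reverse.dropWhile (· == 0) ++ [d] := by
          rw [List.dropWhile_append]
          simp [he]
        rw [hsplit, List.map_append]
        simp

-- msb-first version
theorem pvRender_valBE (ds : List Int) (hb : ∀ d ∈ ds, 0 ≤ d ∧ d < 26) :
    pvRender (pvValBE ds) []
      = (ds.dropWhile (· == 0)).map (fun d => Char.ofNat (97 + d).toNat) := by
  have := pvRender_valLE ds.reverse (fun d hd => hb d (List.mem_reverse.mp hd)) []
  rw [pvValLE_reverse, List.reverse_reverse] at this
  simpa using this

-- dropWhile-'a' commutes with the digit-to-character map on bounded digits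
theorem pvChrA (d : Int) (h0 : 0 ≤ d) (h1 : d < 26) :
    ((Char.ofNat (97 + d).toNat == 'a') = true) ↔ d = 0 := by
  interval_cases d <;> simp_all

theorem pvMapChr_dropWhile (ds : List Int) (hb : ∀ d ∈ ds, 0 ≤ d ∧ d < 26) :
    (ds.map (fun d => Char.ofNat (97 + d).toNat)).dropWhile (· == 'a')
      = (ds.dropWhile (· == 0)).map (fun d => Char.ofNat (97 + d).toNat) := by
  induction ds with
  | nil => rfl
  | cons d t ih =>
    have hd := hb d (by simp)
    simp only [List.map_cons, List.dropWhile_cons]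
    by_cases hz : d = 0
    · subst hz
      have : ((Char.ofNat (97 + (0:Int)).toNat == 'a') = true) := by decide
      simp only [this]
      rw [ih (fun x hx => hb x (by simp [hx]))]
      simp
    · have hne : ¬ ((Char.ofNat (97 + d).toNat == 'a') = true) := by
        intro hc
        exact hz ((pvChrA d hd.1 hd.2).mp hc)
      have hne' : ¬ ((d == 0) = true) := by simpa using hz
      simp [hne, hne']

-- the whole B pipeline computes pvRender of the floored average
theorem pvAltCore (a b : List Char) (hlen : a.length = b.length)
    (h1 : ∀ c ∈ a, 97 ≤ c.toNat ∧ c.toNat ≤ 122)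
    (h2 : ∀ c ∈ b, 97 ≤ c.toNat ∧ c.toNat ≤ 122) :
    (((pvHalveState ((pvSumState a b).2 :: (pvSumState a b).1.reverse)).1).map
        (fun d => Char.ofNat (97 + d).toNat)).dropWhile (· == 'a')
      = pvRender (PySem.Int.floordiv (pvVal a + pvVal b) 2) [] := by
  -- the zipped reversed strings
  set Z := List.zip a.reverse b.reverse with hZ
  have hZlen : Z.length = a.length := by
    simp [hZ, hlen]
  have hZmem : ∀ p ∈ Z, (97 ≤ p.1.toNat ∧ p.1.toNat ≤ 122) ∧ (97 ≤ p.2.toNat ∧ p.2.toNat ≤ 122) := by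
    intro p hp
    have := List.of_mem_zip hp
    exact ⟨h1 p.1 (List.mem_reverse.mp this.1), h2 p.2 (List.mem_reverse.mp this.2)⟩
  -- the sum loop is pvAddC
  have hsum : pvSumState a b = ((pvAddC Z 0).1, (pvAddC Z 0).2) := by
    unfold pvSumState
    rw [← hZ]
    rw [PySem.List.foldl_congr_mem Z _
      (fun (st : List Int × Int) p =>
        (st.1 ++ [PySem.Int.mod (((p.1.toNat : Int) - 97) + ((p.2.toNat : Int) - 97) + st.2) 26],
         PySem.Int.floordiv (((p.1.toNat : Int) - 97) + ((p.2.toNat : Int) - 97) + st.2) 26))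
      ([], 0) ?_]
    · rw [pvSum_fold_shape]
      simp
    · intro acc p hp
      have h := hZmem p hp
      rw [pvIdxLower p.1 h.1.1 h.1.2, pvIdxLower p.2 h.2.1 h.2.2]
      simp only [Option.getD_some]
      have e1 : (((p.1.toNat - 97 : Nat) : Int)) = (p.1.toNat : Int) - 97 := by
        have := h.1.1; push_cast [this]; ring
      have e2 : (((p.2.toNat - 97 : Nat) : Int)) = (p.2.toNat : Int) - 97 := by
        have := h.2.1; push_cast [this]; ring
      rw [e1, e2]
  -- value of the digit string [carry] ++ sums[::-1]
  have hdigval : pvValBE ((pvSumState a b).2 :: (pvSumState a b).1.reverse)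
      = pvVal a + pvVal b := by
    rw [hsum]
    rw [pvValBE_cons]
    rw [List.length_reverse, pvAddC_length, pvValBE_reverse]
    have hval := pvAddC_value Z 0
    have hfst : Z.map (fun p => ((p.1.toNat : Int) - 97)) = a.reverse.map (fun c => ((c.toNat : Int) - 97)) := by
      rw [hZ]
      rw [show (fun p : Char × Char => ((p.1.toNat : Int) - 97))
            = (fun c : Char => ((c.toNat : Int) - 97)) ∘ Prod.fst from rfl]
      rw [← List.map_map, List.map_fst_zip (by simp [hlen])]
    have hsnd : Z.map (fun p => ((p.2.toNat : Int) - 97)) = b.reverse.map (fun c => ((c.toNat : Int) - 97)) := by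
      rw [hZ]
      rw [show (fun p : Char × Char => ((p.2.toNat : Int) - 97))
            = (fun c : Char => ((c.toNat : Int) - 97)) ∘ Prod.snd from rfl]
      rw [← List.map_map, List.map_snd_zip (by simp [hlen])]
    rw [hfst, hsnd] at hval
    have hva : pvValLE (a.reverse.map fun c => ((c.toNat : Int) - 97)) = pvVal a := by
      rw [List.map_reverse, pvValLE_reverse, ← pvVal_eq_valBE]
    have hvb : pvValLE (b.reverse.map fun c => ((c.toNat : Int) - 97)) = pvVal b := by
      rw [List.map_reverse, pvValLE_reverse, ← pvVal_eq_valBE]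
    rw [hva, hvb] at hval
    linarith [hval]
  -- bounds of the digit string
  have hdigbound : ∀ x ∈ ((pvSumState a b).2 :: (pvSumState a b).1.reverse), 0 ≤ x ∧ x < 26 := by
    intro x hx
    rcases List.mem_cons.mp hx with rfl | hx
    · rw [hsum]
      have := pvAddC_carry Z hZmem 0 (by omega) (by omega)
      constructor <;> omega
    · rw [hsum] at hx
      exact pvAddC_digits Z 0 x (List.mem_reverse.mp hx)
  -- the halving loop is pvHalveC
  set D := (pvSumState a b).2 :: (pvSumState a b).1.reverse with hD
  have hhalf : (pvHalveState D).1 = (pvHalveC 0 D).1 := by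
    unfold pvHalveState
    rw [pvHalve_fold_shape]
    simp
  -- its value is the floored average
  have hrem := pvHalveC_rem D 0 (by omega) (by omega)
  have hval2 := pvHalveC_value D 0
  simp only [zero_mul, zero_add] at hval2
  have havg : pvValBE (pvHalveC 0 D).1 = PySem.Int.floordiv (pvVal a + pvVal b) 2 := by
    rw [PySem.Int.floordiv_eq_ediv_of_pos (show (0:Int) < 2 by omega)]
    rw [← hdigval]
    omega
  have hhb : ∀ x ∈ (pvHalveC 0 D).1, 0 ≤ x ∧ x < 26 :=
    pvHalveC_digits D 0 (by omega) (by omega) hdigbound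
  rw [hhalf, pvMapChr_dropWhile _ hhb, ← pvRender_valBE _ hhb, havg]

-- ===== VERDICT (by name: the statement is the Claim_ definition above) =====
theorem get_lexical_rank_spec : Claim_equal_get_lexical_rank := by
  intro s1 s2 _ hpre
  unfold Spec_get_lexical_rank
  unfold Pre_get_lexical_rank at hpre
  simp only [List.all_append, Bool.and_eq_true, List.all_eq_true, Bool.and_eq_true,
    decide_eq_true_eq] at hpre
  obtain ⟨hp1, hp2⟩ := hpre
  simp only [get_lexical_rank, get_lexical_rank_alt]
  have ht1 : ∀ c ∈ (if s1.toList.dropWhile (· == 'a') = [] then ['a']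
      else s1.toList.dropWhile (· == 'a')), 97 ≤ c.toNat ∧ c.toNat ≤ 122 := by
    intro c hc
    split at hc
    · simp at hc; subst hc; exact ⟨by decide, by decide⟩
    · exact hp1 c ((List.dropWhile_sublist _).subset hc)
  have ht2 : ∀ c ∈ (if s2.toList.dropWhile (· == 'a') = [] then ['a']
      else s2.toList.dropWhile (· == 'a')), 97 ≤ c.toNat ∧ c.toNat ≤ 122 := by
    intro c hc
    split at hc
    · simp at hc; subst hc; exact ⟨by decide, by decide⟩
    · exact hp2 c ((List.dropWhile_sublist _).subset hc)
  set t1 := (if s1.toList.dropWhile (· == 'a') = [] then ['a']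
      else s1.toList.dropWhile (· == 'a')) with ht1e
  set t2 := (if s2.toList.dropWhile (· == 'a') = [] then ['a']
      else s2.toList.dropWhile (· == 'a')) with ht2e
  set m := max t1.length t2.length with hm
  rw [pvPad_eq t1 m, pvPad_eq t2 m]
  set p1 := t1 ++ List.replicate (m - t1.length) 'a' with hp1e
  set p2 := t2 ++ List.replicate (m - t2.length) 'a' with hp2e
  have hq1 : ∀ c ∈ p1, 97 ≤ c.toNat ∧ c.toNat ≤ 122 := by
    intro c hc
    rcases List.mem_append.mp hc with h | h
    · exact ht1 c h
    · rw [List.eq_of_mem_replicate h]; exact ⟨by decide, by decide⟩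
  have hq2 : ∀ c ∈ p2, 97 ≤ c.toNat ∧ c.toNat ≤ 122 := by
    intro c hc
    rcases List.mem_append.mp hc with h | h
    · exact ht2 c h
    · rw [List.eq_of_mem_replicate h]; exact ⟨by decide, by decide⟩
  have hlen : p1.length = p2.length := by
    simp only [hp1e, hp2e, List.length_append, List.length_replicate]
    have hle1 : t1.length ≤ m := le_max_left _ _
    have hle2 : t2.length ≤ m := le_max_right _ _
    omega
  rw [pvGLA _ _ hq1 hq2]
  rw [pvAltCore p1 p2 hlen hq1 hq2]
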